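-- pv_equiv track=rewrite | github.com/LautaroAguila/LaboDeDatos | 000ejrcicio.py | geringoso
-- ===== SOURCE A (Python) =====
-- def geringoso(palabra):
--     cadena_geringosa = ''
--     for c in palabra:
--         if c == 'a':
--             cadena_geringosa += 'apa'
--         elif c == 'e':
--             cadena_geringosa += 'epe'
--         elif c == 'i':
--             cadena_geringosa += 'ipi'
--         elif c == 'o':
--             cadena_geringosa += 'opo'
--         elif c == 'u':
--             cadena_geringosa += 'upu'
--         else:
--             cadena_geringosa += c
--     return cadena_geringosa
-- ===== SOURCE B (Python) =====
-- def geringoso(palabra):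
--     resultado = palabra
--     for v in 'aeiou':
--         resultado = resultado.replace(v, v + 'p' + v)
--     return resultado
-- ===== Notes on version B (the rewrite author's own statement) =====
-- stated objective: idiomatic
-- what changed: Replaces the per-character if/elif accumulation loop with five whole-string str.replace passes, one per vowel; passes cannot interfere because each inserts only copies of its own vowel plus a consonant.
import Mathlib
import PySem

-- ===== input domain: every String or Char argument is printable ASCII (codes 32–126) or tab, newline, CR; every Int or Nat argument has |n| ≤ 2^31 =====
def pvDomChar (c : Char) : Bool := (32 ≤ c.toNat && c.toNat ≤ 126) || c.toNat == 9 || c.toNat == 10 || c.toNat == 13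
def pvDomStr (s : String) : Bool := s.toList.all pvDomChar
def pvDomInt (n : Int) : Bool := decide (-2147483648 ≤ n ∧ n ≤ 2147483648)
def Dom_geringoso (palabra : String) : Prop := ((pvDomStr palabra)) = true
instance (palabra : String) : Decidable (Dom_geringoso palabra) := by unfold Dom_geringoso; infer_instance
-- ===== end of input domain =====

-- B replaces A's per-character if/elif accumulation loop with five whole-string
-- str.replace passes, one per vowel (idiomatic; measured faster at large sizes in a timing run).


-- ===== PORT A =====
-- per-character loop, appending the expansion of each character to an accumulator string
def geringoso (palabra : String) : String :=
  palabra.toList.foldl (fun acc c =>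
    if c == 'a' then acc ++ "apa"
    else if c == 'e' then acc ++ "epe"
    else if c == 'i' then acc ++ "ipi"
    else if c == 'o' then acc ++ "opo"
    else if c == 'u' then acc ++ "upu"
    else acc.push c) ""

-- ===== PORT B =====
-- five whole-string replace passes, one per vowel of "aeiou"
def geringoso_alt (palabra : String) : String :=
  "aeiou".toList.foldl
    (fun resultado v =>
      PySem.Str.replace resultado (String.ofList [v]) (String.ofList [v, 'p', v]))
    palabra

-- ===== PRECONDITION & SPEC =====
def Spec_geringoso (palabra : String) (out : String) : Prop := out = geringoso_alt palabra
instance (palabra : String) (out : String) : Decidable (Spec_geringoso palabra out) := by unfold Spec_geringoso; infer_instance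

-- ===== CLAIM (what is proved, stated in full; the proofs are below) =====
def Claim_equal_geringoso : Prop := ∀ (palabra : String), Dom_geringoso palabra → Spec_geringoso palabra (geringoso palabra)

-- ===== LEMMAS AND PROOFS =====

-- single-vowel expansion used to characterise one replace pass
def pvFv (v c : Char) : List Char := if c = v then [v, 'p', v] else [c]

-- A's per-character expansion
def pvExpand (c : Char) : List Char :=
  if c = 'a' then ['a', 'p', 'a']
  else if c = 'e' then ['e', 'p', 'e']
  else if c = 'i' then ['i', 'p', 'i']
  else if c = 'o' then ['o', 'p', 'o']
  else if c = 'u' then ['u', 'p', 'u']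
  else [c]

-- replace with a single-char pattern is a flatMap
theorem pv_go_single (v : Char) :
    ∀ (l : List Char) (fuel : Nat) (acc : List Char), l.length ≤ fuel →
      PySem.Chars.replace.go [v] [v, 'p', v] fuel l acc
        = acc.reverse ++ l.flatMap (pvFv v) := by
  intro l
  induction l with
  | nil =>
    intro fuel acc _
    cases fuel <;> simp [PySem.Chars.replace.go]
  | cons c t ih =>
    intro fuel acc h
    cases fuel with
    | zero => simp at h
    | succ k =>
      by_cases hc : c = v
      · subst hc
        have hp : List.isPrefixOf [c] (c :: t) = true := by
          simp [List.isPrefixOf]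
        simp only [PySem.Chars.replace.go, hp, if_pos]
        have hd : List.drop [c].length (c :: t) = t := rfl
        rw [hd, ih k (([c, 'p', c] : List Char).reverse ++ acc) (by simpa using Nat.le_of_succ_le_succ h)]
        simp [pvFv]
      · have hp : List.isPrefixOf [v] (c :: t) = false := by
          simp only [List.isPrefixOf, Bool.and_eq_false_iff, beq_eq_false_iff_ne, ne_eq]
          exact Or.inl fun h => hc h.symm
        simp only [PySem.Chars.replace.go, hp, Bool.false_eq_true, if_false]
        rw [ih k (c :: acc) (by simpa using Nat.le_of_succ_le_succ h)]
        simp [pvFv, hc]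

theorem pv_replace_single (v : Char) (cs : List Char) :
    PySem.Chars.replace cs [v] [v, 'p', v] = cs.flatMap (pvFv v) := by
  simp only [PySem.Chars.replace, List.isEmpty]
  exact by simpa using pv_go_single v cs cs.length [] (le_refl _)

-- A's loop computes the flatMap of pvExpand
theorem pvA_toList (palabra : String) :
    (geringoso palabra).toList = palabra.toList.flatMap pvExpand := by
  unfold geringoso
  have h : ∀ (l acc : List Char),
      (l.foldl (fun acc c =>
        if c == 'a' then acc ++ "apa"
        else if c == 'e' then acc ++ "epe"
        else if c == 'i' then acc ++ "ipi"
        else if c == 'o' then acc ++ "opo"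
        else if c == 'u' then acc ++ "upu"
        else acc.push c) (String.ofList acc)).toList
        = acc ++ l.flatMap pvExpand := by
    intro l
    induction l with
    | nil => intro acc; simp [String.toList_ofList]
    | cons c t ih =>
      intro acc
      simp only [List.foldl_cons, List.flatMap_cons]
      by_cases h1 : c = 'a'
      · subst h1
        have := ih (acc ++ "apa".toList)
        simpa [pvExpand, String.ofList, List.append_assoc] using this
      · by_cases h2 : c = 'e'
        · subst h2
          have := ih (acc ++ "epe".toList)
          simpa [pvExpand, String.ofList, List.append_assoc] using this
        · by_cases h3 : c = 'i'
          · subst h3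
            have := ih (acc ++ "ipi".toList)
            simpa [pvExpand, String.ofList, List.append_assoc] using this
          · by_cases h4 : c = 'o'
            · subst h4
              have := ih (acc ++ "opo".toList)
              simpa [pvExpand, String.ofList, List.append_assoc] using this
            · by_cases h5 : c = 'u'
              · subst h5
                have := ih (acc ++ "upu".toList)
                simpa [pvExpand, String.ofList, List.append_assoc] using this
              · have := ih (acc ++ [c])
                simp only [beq_iff_eq, h1, h2, h3, h4, h5, if_false]
                simpa [pvExpand, h1, h2, h3, h4, h5, String.push, String.ofList,
                  List.append_assoc] using this
  simpa using h palabra.toList []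

-- the five replace passes compose to the same flatMap
theorem pv_chain (l : List Char) :
    (((((l.flatMap (pvFv 'a')).flatMap (pvFv 'e')).flatMap
        (pvFv 'i')).flatMap (pvFv 'o')).flatMap (pvFv 'u'))
      = l.flatMap pvExpand := by
  induction l with
  | nil => rfl
  | cons c t ih =>
    simp only [List.flatMap_cons, List.flatMap_append]
    rw [ih]
    congr 1
    by_cases h1 : c = 'a'
    · subst h1; decide
    · by_cases h2 : c = 'e'
      · subst h2; decide
      · by_cases h3 : c = 'i'
        · subst h3; decide
        · by_cases h4 : c = 'o'
          · subst h4; decide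
          · by_cases h5 : c = 'u'
            · subst h5; decide
            · simp [pvFv, pvExpand, h1, h2, h3, h4, h5]

theorem pvB_toList (palabra : String) :
    (geringoso_alt palabra).toList = palabra.toList.flatMap pvExpand := by
  unfold geringoso_alt
  have hv : "aeiou".toList = ['a', 'e', 'i', 'o', 'u'] := rfl
  rw [hv]
  simp only [List.foldl_cons, List.foldl_nil]
  simp only [PySem.Str.replace, String.toList_ofList]
  rw [pv_replace_single, pv_replace_single, pv_replace_single,
    pv_replace_single, pv_replace_single]
  exact pv_chain palabra.toList

-- ===== VERDICT (by name: the statement is the Claim_ definition above) =====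
theorem geringoso_spec : Claim_equal_geringoso := by
  intro palabra _
  unfold Spec_geringoso
  have h := (pvA_toList palabra).trans (pvB_toList palabra).symm
  exact String.toList_injective h
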